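-- pv_equiv track=rewrite | github.com/eateren/advent-of-code-2020 | 6/aoc2020-6.py | countYeses
-- ===== SOURCE A (Python) =====
-- def countYeses(data):
--
--     sum = 0
--     ABC = "abcdefghijklmnopqrstuvwxyz"
--
--     for line in data:
--
--         count = 0
--         for x in ABC:
--
--             if x in line:
--
--                 count += 1
--
--         sum += count
--
--     return sum
-- ===== SOURCE B (Python) =====
-- def countYeses(data):
--     total = 0
--     for line in data:
--         mask = 0
--         count = 0
--         for ch in line:
--             o = ord(ch)
--             if 97 <= o <= 122:
--                 bit = 1 << (o - 97)
--                 if mask & bit == 0: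
--                     mask |= bit
--                     count += 1
--         total += count
--     return total
-- ===== Notes on version B (the rewrite author's own statement) =====
-- stated objective: alternative
-- what changed: Replaces A's 26-iteration per-letter loop with substring probes of each line by a single pass over the line's characters maintaining a 26-bit seen-letter bitmask and a running count of newly seen lowercase letters.
import Mathlib
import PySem

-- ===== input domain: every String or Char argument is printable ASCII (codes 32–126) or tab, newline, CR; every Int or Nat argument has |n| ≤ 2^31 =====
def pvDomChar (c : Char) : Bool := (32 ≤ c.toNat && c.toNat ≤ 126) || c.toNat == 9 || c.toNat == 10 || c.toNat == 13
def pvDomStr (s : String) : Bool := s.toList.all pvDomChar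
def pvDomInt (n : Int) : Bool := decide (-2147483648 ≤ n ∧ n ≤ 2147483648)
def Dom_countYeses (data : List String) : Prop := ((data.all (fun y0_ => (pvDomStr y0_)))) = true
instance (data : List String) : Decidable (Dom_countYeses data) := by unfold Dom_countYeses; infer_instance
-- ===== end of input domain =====

-- B replaces A's 26 per-letter substring probes of each line by one pass over the line's
-- characters maintaining a 26-bit seen-letter bitmask and a count of newly seen lowercase letters.


set_option maxRecDepth 8000

-- ===== PORT A =====
def pvABC : String := "abcdefghijklmnopqrstuvwxyz"

-- literal port of A: for each line, loop over the 26 letters, test 'x in line', accumulate count then sum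
def countYeses (data : List String) : Int :=
  data.foldl
    (fun sum line =>
      sum + pvABC.toList.foldl
        (fun count x => if PySem.Chars.isIn [x] line.toList then count + 1 else count)
        (0 : Int))
    0

-- ===== PORT B =====
-- one step of B's inner loop: ord the char; if lowercase and its bit is unset, set it and count it
def pvStep (st : Nat × Int) (c : Char) : Nat × Int :=
  let o := c.toNat
  if 97 ≤ o ∧ o ≤ 122 then
    let bit := 1 <<< (o - 97)
    if st.1 &&& bit == 0 then (st.1 ||| bit, st.2 + 1) else st
  else st

-- port of B: single pass per line with (mask, count) state
def countYeses_alt (data : List String) : Int :=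
  data.foldl (fun total line => total + (line.toList.foldl pvStep (0, (0 : Int))).2) 0

-- ===== PRECONDITION & SPEC =====
def Spec_countYeses (data : List String) (out : Int) : Prop := out = countYeses_alt data
instance (data : List String) (out : Int) : Decidable (Spec_countYeses data out) := by unfold Spec_countYeses; infer_instance

-- ===== CLAIM (what is proved, stated in full; the proofs are below) =====
def Claim_equal_countYeses : Prop := ∀ (data : List String), Dom_countYeses data → Spec_countYeses data (countYeses data)

-- ===== LEMMAS AND PROOFS =====

-- the j-th lowercase letter
def pvLetter (j : Nat) : Char := pvABC.toList.getD j 'a'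

theorem pvLetter_toNat : ∀ j ∈ List.range 26, (pvLetter j).toNat = 97 + j := by decide

theorem pvLetter_mem : ∀ j ∈ List.range 26, pvLetter j ∈ pvABC.toList := by decide

theorem pvABC_nodup : pvABC.toList.Nodup := by decide

theorem pvABC_range_bool : pvABC.toList.all (fun x => 97 ≤ x.toNat && x.toNat ≤ 122) = true := by
  decide

theorem pvABC_range : ∀ x ∈ pvABC.toList, 97 ≤ x.toNat ∧ x.toNat ≤ 122 := by
  intro x hx
  have := List.all_eq_true.mp pvABC_range_bool x hx
  simpa using this

theorem pv_toNat_inj {c d : Char} (h : c.toNat = d.toNat) : c = d := by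
  rw [← Char.ofNat_toNat c, ← Char.ofNat_toNat d, h]

-- the bit test B performs, phrased through Nat.testBit
theorem pv_and_bit (mask j : Nat) : (mask &&& (1 <<< j) == 0) = !(mask.testBit j) := by
  rw [Nat.one_shiftLeft, Nat.and_two_pow]
  cases h : mask.testBit j
  · simp
  · simp

theorem pv_testBit_or_bit (mask j j' : Nat) :
    (mask ||| (1 <<< j)).testBit j' = (mask.testBit j' || decide (j = j')) := by
  rw [Nat.testBit_or, Nat.one_shiftLeft, Nat.testBit_two_pow]

theorem pv_countP_congr_mem (l S T : List Char) (h : ∀ x ∈ l, (x ∈ S ↔ x ∈ T)) :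
    l.countP (fun x => decide (x ∈ S)) = l.countP (fun x => decide (x ∈ T)) :=
  List.countP_congr (fun x hx => by simpa using h x hx)

theorem pv_countP_snoc_new (l : List Char) (S : List Char) (c : Char)
    (hn : l.Nodup) (hc : c ∈ l) (hcs : c ∉ S) :
    l.countP (fun x => decide (x ∈ S ++ [c])) = l.countP (fun x => decide (x ∈ S)) + 1 := by
  induction l with
  | nil => cases hc
  | cons a l ih =>
    rcases List.mem_cons.mp hc with rfl | hcl
    · have hcl : c ∉ l := (List.nodup_cons.mp hn).1
      simp only [List.countP_cons]
      have h1 : decide (c ∈ S ++ [c]) = true := by simp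
      have h2 : decide (c ∈ S) = false := by simpa using hcs
      rw [h1, h2,
        pv_countP_congr_mem l (S ++ [c]) S (fun x hx => by
          have hne : x ≠ c := fun e => hcl (e ▸ hx)
          simp [List.mem_append, hne])]
      simp
    · by_cases hac : a = c
      · subst hac
        exact absurd hcl (List.nodup_cons.mp hn).1
      · simp only [List.countP_cons]
        rw [ih (List.nodup_cons.mp hn).2 hcl]
        have : decide (a ∈ S ++ [c]) = decide (a ∈ S) := by
          simp [List.mem_append, hac]
        rw [this]; ring

-- B's inner loop invariant: mask encodes which lowercase letters occur in the processed prefix S,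
-- count is the number of alphabet letters occurring in S.
theorem pv_fold_inv (L : List Char) : ∀ (S : List Char) (mask : Nat) (count : Int),
    (∀ j, mask.testBit j = true ↔ (j < 26 ∧ pvLetter j ∈ S)) →
    count = (pvABC.toList.countP (fun x => decide (x ∈ S)) : Int) →
    (L.foldl pvStep (mask, count)).2
      = (pvABC.toList.countP (fun x => decide (x ∈ S ++ L)) : Int) := by
  induction L with
  | nil => intro S mask count henc hcnt; simpa using hcnt
  | cons c L ih =>
    intro S mask count henc hcnt
    have hSL : S ++ c :: L = (S ++ [c]) ++ L := by simp
    rw [List.foldl_cons, hSL]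
    by_cases hlc : 97 ≤ c.toNat ∧ c.toNat ≤ 122
    · -- lowercase
      have hj26 : c.toNat - 97 < 26 := by omega
      have hjr : c.toNat - 97 ∈ List.range 26 := List.mem_range.mpr hj26
      have hjc : (pvLetter (c.toNat - 97)).toNat = c.toNat := by
        have := pvLetter_toNat _ hjr; omega
      have hlet : pvLetter (c.toNat - 97) = c := pv_toNat_inj hjc
      have hcABC : c ∈ pvABC.toList := hlet ▸ pvLetter_mem _ hjr
      by_cases hb : mask.testBit (c.toNat - 97) = true
      · -- already seen: state unchanged
        have hstep : pvStep (mask, count) c = (mask, count) := by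
          simp only [pvStep, hlc, pv_and_bit, hb]
          simp
        rw [hstep]
        have hcS : c ∈ S := hlet ▸ ((henc _).mp hb).2
        have hmem : ∀ x, x ∈ S ++ [c] ↔ x ∈ S := by
          intro x
          simp only [List.mem_append, List.mem_singleton]
          exact ⟨fun h => h.elim id (fun e => e ▸ hcS), Or.inl⟩
        exact ih (S ++ [c]) mask count
          (fun j' => (henc j').trans (and_congr_right fun _ => (hmem _).symm))
          (by rw [hcnt, pv_countP_congr_mem pvABC.toList S (S ++ [c]) fun x _ => (hmem x).symm])
      · -- new letter: set the bit, bump the count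
        have hb' : mask.testBit (c.toNat - 97) = false := by
          cases h : mask.testBit (c.toNat - 97)
          · rfl
          · exact absurd h hb
        have hstep : pvStep (mask, count) c
            = (mask ||| (1 <<< (c.toNat - 97)), count + 1) := by
          simp only [pvStep, hlc, pv_and_bit, hb']
          simp
        rw [hstep]
        have hcS : c ∉ S := fun hcs => by
          have := (henc (c.toNat - 97)).mpr ⟨hj26, by rw [hlet]; exact hcs⟩
          rw [hb'] at this; cases this
        refine ih (S ++ [c]) _ _ ?_ ?_
        · intro j'
          rw [pv_testBit_or_bit]
          constructor
          · intro h
            rcases Bool.or_eq_true_iff.mp h with h | h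
            · rcases (henc j').mp h with ⟨h1, h2⟩
              exact ⟨h1, by simp [List.mem_append, h2]⟩
            · have hj : c.toNat - 97 = j' := of_decide_eq_true h
              subst hj
              exact ⟨hj26, by simp [List.mem_append, hlet]⟩
          · rintro ⟨h1, h2⟩
            rcases List.mem_append.mp h2 with h2 | h2
            · exact Bool.or_eq_true_iff.mpr (Or.inl ((henc j').mpr ⟨h1, h2⟩))
            · have he : pvLetter j' = c := by simpa using h2
              have hjn : (pvLetter j').toNat = 97 + j' := pvLetter_toNat _ (List.mem_range.mpr h1)
              have : c.toNat - 97 = j' := by rw [he] at hjn; omega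
              exact Bool.or_eq_true_iff.mpr (Or.inr (decide_eq_true this))
        · rw [hcnt, pv_countP_snoc_new pvABC.toList S c pvABC_nodup hcABC hcS]
          push_cast; ring
    · -- not lowercase: state unchanged and c is not an alphabet letter
      have hstep : pvStep (mask, count) c = (mask, count) := by
        simp only [pvStep, hlc]
        simp
      rw [hstep]
      have hmem : ∀ x ∈ pvABC.toList, (x ∈ S ++ [c] ↔ x ∈ S) := by
        intro x hx
        have hne : x ≠ c := fun e => hlc (e ▸ pvABC_range x hx)
        simp [List.mem_append, hne]
      exact ih (S ++ [c]) mask count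
        (fun j' => (henc j').trans (by
          constructor <;> rintro ⟨h1, h2⟩
          · exact ⟨h1, (hmem _ (pvLetter_mem _ (List.mem_range.mpr h1))).mpr h2⟩
          · exact ⟨h1, (hmem _ (pvLetter_mem _ (List.mem_range.mpr h1))).mp h2⟩))
        (by rw [hcnt, pv_countP_congr_mem pvABC.toList S (S ++ [c]) fun x hx => (hmem x hx).symm])

-- A's per-letter count of a line equals B's bitmask pass over the line
theorem pv_line_eq (L : List Char) :
    pvABC.toList.foldl
      (fun count x => if PySem.Chars.isIn [x] L then count + 1 else count) (0 : Int)
    = (L.foldl pvStep (0, (0 : Int))).2 := by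
  rw [PySem.List.foldl_if_add_one]
  rw [pv_fold_inv L [] 0 0 (fun j => by simp [Nat.zero_testBit]) (by simp)]
  simp only [List.nil_append, zero_add]
  congr 1
  exact List.countP_congr (fun x _ => by
    simp [PySem.Chars.isIn_iff_infix, List.singleton_infix_iff])

-- ===== VERDICT (by name: the statement is the Claim_ definition above) =====
theorem countYeses_spec : Claim_equal_countYeses := by
  intro data _
  show countYeses data = countYeses_alt data
  unfold countYeses countYeses_alt
  have h : (fun (sum : Int) (line : String) =>
      sum + pvABC.toList.foldl
        (fun count x => if PySem.Chars.isIn [x] line.toList then count + 1 else count) (0 : Int))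
    = (fun (total : Int) (line : String) => total + (line.toList.foldl pvStep (0, (0 : Int))).2) := by
    funext s line; rw [pv_line_eq]
  rw [h]
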